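-- pv_equiv track=rewrite | github.com/selvi7/samplepyhon | a34.py | check
-- ===== SOURCE A (Python) =====
-- def check(S, K):
--
--     # Iterate over all possible characters
--     for ch in range(0, 26):
--         c = chr(97 + ch) # Ascii value of 'a' => 97
--
--         # stores the last occurrence
--         last = -1
--
--         # set answer as true
--         found = True
--         for i in range(0, K):
--             if S[i] == c:
--                 last = i
--
--         # No occurrence found of current character
--         # in first substring of length K
--         if last == -1:
--             continue
--
--         # Check for every last substring
--         # of length K where last occurr-
--         # ence exists in substring
--         for i in range(K, len(S)):
--             if S[i] == c:
--                 last = i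
--
--             # If last occ is not
--             # present in substring
--             if last <= (i - K):
--                 found = False
--                 break
--
--         # current character is K amazing
--         if found:
--             return 1
--
--     return 0
-- ===== SOURCE B (Python) =====
-- def check(S, K):
--     # Single pass over S: for each lowercase letter track the last occurrence and the
--     # maximum gap between consecutive occurrences (with a virtual occurrence
--     # at index -1); the letter is K-amazing iff every gap, including the tail
--     # gap len(S) - last, is at most K.
--     n = len(S)
--     last = [-1] * 26
--     maxgap = [0] * 26
--     for i, ch in enumerate(S):
--         c = ord(ch) - 97
--         if 0 <= c < 26:
--             g = i - last[c]
--             if g > maxgap[c]: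
--                 maxgap[c] = g
--             last[c] = i
--     for c in range(26):
--         g = n - last[c]
--         mg = g if g > maxgap[c] else maxgap[c]
--         if mg <= K:
--             return 1
--     return 0
-- ===== Notes on version B (the rewrite author's own statement) =====
-- stated objective: alternative
-- what changed: Replaces A's 26 per-letter passes over the string (each rescanning the first window and then every subsequent window) by one single pass that records, per letter, the last occurrence and the maximum gap between consecutive occurrences; a letter is in every length-K window iff its maximum gap (including the leading and trailing gaps) is at most K.
import Mathlib
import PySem

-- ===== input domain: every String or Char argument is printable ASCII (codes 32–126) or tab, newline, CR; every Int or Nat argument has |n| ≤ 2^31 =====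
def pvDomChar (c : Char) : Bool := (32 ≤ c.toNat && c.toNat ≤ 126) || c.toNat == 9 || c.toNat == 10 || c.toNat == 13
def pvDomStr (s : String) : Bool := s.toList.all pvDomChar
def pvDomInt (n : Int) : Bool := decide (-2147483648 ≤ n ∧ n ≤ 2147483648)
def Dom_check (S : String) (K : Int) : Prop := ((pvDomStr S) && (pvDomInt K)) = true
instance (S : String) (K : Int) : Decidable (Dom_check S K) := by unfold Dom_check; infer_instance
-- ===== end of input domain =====

-- B replaces A's 26 per-letter scans over the string by ONE pass recording, per letter,
-- the last occurrence and the maximum gap between consecutive occurrences (objective: alternative algorithm).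

-- ===== PORT A =====
-- first inner loop: last = -1; for i in range(0, K): if S[i] == c: last = i
-- (the ' ' default of pyGetD is never read: Pre_check gives K ≤ len(S))
def checkFirst (l : List Char) (c : Char) (K : Int) : Int :=
  (PySem.List.pyRange 0 K 1).foldl
    (fun last i => if PySem.List.pyGetD l i ' ' = c then i else last) (-1)

-- second inner loop with break: for i in range(K, len(S)): …
def checkScan (l : List Char) (c : Char) (K : Int) (last : Int) : List Int → Bool
  | [] => true
  | i :: rest =>
    let last' := if PySem.List.pyGetD l i ' ' = c then i else last
    if last' ≤ i - K then false else checkScan l c K last' rest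

-- outer loop: for ch in range(0, 26): … return 1 / fall through to return 0
def checkLoop (l : List Char) (K : Int) : List Nat → Int
  | [] => 0
  | ch :: rest =>
    let c := Char.ofNat (97 + ch)
    let last := checkFirst l c K
    if last = -1 then checkLoop l K rest
    else if checkScan l c K last (PySem.List.pyRange K (l.length : Int) 1) then 1
    else checkLoop l K rest

def check (S : String) (K : Int) : Int := checkLoop S.toList K (List.range 26)

-- ===== PORT B =====
-- the two 26-slot arrays `last` and `maxgap` are modelled as functions Nat → Int updated pointwise
def altStep (st : (Nat → Int) × (Nat → Int)) (p : Int × Char) : (Nat → Int) × (Nat → Int) :=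
  let c : Int := (p.2.toNat : Int) - 97
  if 0 ≤ c ∧ c < 26 then
    let e := c.toNat
    let g := p.1 - st.1 e
    (fun d => if d = e then p.1 else st.1 d,
     fun d => if d = e then (if g > st.2 e then g else st.2 e) else st.2 d)
  else st

-- for c in range(26): g = n - last[c]; mg = g if g > maxgap[c] else maxgap[c]; if mg <= K: return 1
def altFinish (n K : Int) (last mg : Nat → Int) : List Nat → Int
  | [] => 0
  | c :: rest =>
    let g := n - last c
    let m := if g > mg c then g else mg c
    if m ≤ K then 1 else altFinish n K last mg rest

def check_alt (S : String) (K : Int) : Int :=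
  let l := S.toList
  let st := (PySem.List.enumerate l 0).foldl altStep (fun _ => -1, fun _ => 0)
  altFinish (l.length : Int) K st.1 st.2 (List.range 26)

-- ===== PRECONDITION & SPEC =====
-- Pre_check excludes exactly the inputs where A raises IndexError (K > len(S): the first inner loop indexes S[i] for i up to K-1)
def Pre_check (S : String) (K : Int) : Prop := K ≤ (S.toList.length : Int)
instance (S : String) (K : Int) : Decidable (Pre_check S K) := by unfold Pre_check; infer_instance
def pvWitness_check : String × Int := ("abcab", 3)

def Spec_check (S : String) (K : Int) (out : Int) : Prop := out = check_alt S K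
instance (S : String) (K : Int) (out : Int) : Decidable (Spec_check S K out) := by unfold Spec_check; infer_instance

-- ===== CLAIM (what is proved, stated in full; the proofs are below) =====
def Claim_equal_check : Prop := ∀ (S : String) (K : Int), Dom_check S K → Pre_check S K → Spec_check S K (check S K)

-- ===== LEMMAS AND PROOFS =====

-- last-occurrence index of c in l, counting from i, default a
def lastIdxA (c : Char) (i a : Int) : List Char → Int
  | [] => a
  | x :: xs => lastIdxA c (i + 1) (if x = c then i else a) xs

-- the common characterisation: every "gap" j - lastOccurrence(first j chars) is ≤ K
def Good (l : List Char) (c : Char) (K : Int) : Prop :=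
  ∀ t : Nat, t ≤ l.length → (t : Int) - lastIdxA c 0 (-1) (l.take t) ≤ K

theorem lastIdxA_append (c : Char) : ∀ (xs ys : List Char) (i a : Int),
    lastIdxA c i a (xs ++ ys) = lastIdxA c (i + xs.length) (lastIdxA c i a xs) ys := by
  intro xs
  induction xs with
  | nil => intro ys i a; simp [lastIdxA]
  | cons x xs ih =>
    intro ys i a
    simp only [List.cons_append, lastIdxA, ih, List.length_cons]
    congr 1
    push_cast
    ring

theorem lastIdxA_bounds (c : Char) : ∀ (l : List Char) (i a : Int),
    lastIdxA c i a l = a ∨ (i ≤ lastIdxA c i a l ∧ lastIdxA c i a l < i + l.length) := by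
  intro l
  induction l with
  | nil => intro i a; left; rfl
  | cons x xs ih =>
    intro i a
    simp only [lastIdxA, List.length_cons]
    by_cases hx : x = c
    · rw [if_pos hx]
      rcases ih (i + 1) i with h | h
      · right; push_cast; omega
      · right; push_cast; omega
    · rw [if_neg hx]
      rcases ih (i + 1) a with h | h
      · left; exact h
      · right; push_cast; omega

theorem lastIdx_ge (c : Char) (l : List Char) : -1 ≤ lastIdxA c 0 (-1) l := by
  rcases lastIdxA_bounds c l 0 (-1) with h | h <;> omega

theorem lastIdx_lt (c : Char) (l : List Char) : lastIdxA c 0 (-1) l < l.length := by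
  rcases lastIdxA_bounds c l 0 (-1) with h | h <;> omega

theorem take_succ_lastIdx (c : Char) (l : List Char) (m : Nat) (hm : m < l.length) :
    lastIdxA c 0 (-1) (l.take (m + 1)) =
      if l[m] = c then (m : Int) else lastIdxA c 0 (-1) (l.take m) := by
  have h1 : l.take (m + 1) = l.take m ++ [l[m]] := by
    rw [List.take_succ]
    simp [List.getElem?_eq_getElem hm]
  rw [h1, lastIdxA_append]
  have h2 : (l.take m).length = m := by simp; omega
  simp [lastIdxA, h2]

theorem checkFirst_aux (l : List Char) (c : Char) : ∀ m : Nat, m ≤ l.length →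
    (PySem.List.pyRange 0 (m : Int) 1).foldl
      (fun last i => if PySem.List.pyGetD l i ' ' = c then i else last) (-1) =
      lastIdxA c 0 (-1) (l.take m) := by
  intro m
  induction m with
  | zero => intro _; simp [PySem.List.pyRange_one_eq_nil, lastIdxA]
  | succ m ih =>
    intro hm1
    have hm : m < l.length := by omega
    have hstep : (PySem.List.pyRange 0 ((m : Int) + 1) 1) = PySem.List.pyRange 0 (m : Int) 1 ++ [(m : Int)] := by
      exact PySem.List.pyRange_one_succ_right (by positivity)
    have hc : ((m + 1 : Nat) : Int) = (m : Int) + 1 := by push_cast; ring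
    rw [hc, hstep, List.foldl_append, ih (by omega), take_succ_lastIdx c l m hm]
    have hg : PySem.List.pyGetD l (m : Int) ' ' = l[m] := by
      rw [PySem.List.pyGetD_natCast]
      exact List.getD_eq_getElem l ' ' hm
    simp [hg]

theorem checkFirst_eq (l : List Char) (c : Char) (K : Int) (h0 : 0 ≤ K) (hK : K ≤ (l.length : Int)) :
    checkFirst l c K = lastIdxA c 0 (-1) (l.take K.toNat) := by
  have hKn : K = (K.toNat : Int) := by omega
  rw [checkFirst, hKn]
  exact checkFirst_aux l c K.toNat (by omega)

theorem checkScan_iff (l : List Char) (c : Char) (K : Int) :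
    ∀ (m : Nat) (j : Int), 0 ≤ j → j + m = (l.length : Int) →
    (checkScan l c K (lastIdxA c 0 (-1) (l.take j.toNat)) (PySem.List.pyRange j (l.length : Int) 1) = true ↔
      ∀ t : Nat, j.toNat < t → t ≤ l.length → (t : Int) - lastIdxA c 0 (-1) (l.take t) ≤ K) := by
  intro m
  induction m with
  | zero =>
    intro j hj hjm
    have : PySem.List.pyRange j (l.length : Int) 1 = [] := PySem.List.pyRange_one_eq_nil (by omega)
    rw [this]
    simp only [checkScan, true_iff]
    intro t ht1 ht2
    omega
  | succ m ih =>
    intro j hj hjm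
    obtain ⟨t, rfl⟩ : ∃ t : Nat, j = (t : Int) := ⟨j.toNat, by omega⟩
    have htl : t < l.length := by omega
    have hjl : (t : Int) < (l.length : Int) := by exact_mod_cast htl
    rw [PySem.List.pyRange_one_cons hjl]
    simp only [checkScan, Int.toNat_natCast]
    have hg : PySem.List.pyGetD l (t : Int) ' ' = l[t] := by
      rw [PySem.List.pyGetD_natCast]
      exact List.getD_eq_getElem l ' ' htl
    have hlast' : (if PySem.List.pyGetD l (t : Int) ' ' = c then (t : Int) else lastIdxA c 0 (-1) (l.take t)) =
        lastIdxA c 0 (-1) (l.take (t + 1)) := by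
      rw [take_succ_lastIdx c l t htl, hg]
    rw [hlast']
    set L := lastIdxA c 0 (-1) (l.take (t + 1)) with hL
    by_cases hbr : L ≤ (t : Int) - K
    · rw [if_pos hbr]
      simp only [Bool.false_eq_true, false_iff]
      intro h
      have hh := h (t + 1) (by omega) (by omega)
      rw [← hL] at hh
      push_cast at hh
      omega
    · rw [if_neg hbr]
      have hih := ih ((t : Int) + 1) (by omega) (by omega)
      have h2 : ((t : Int) + 1).toNat = t + 1 := by omega
      rw [h2, ← hL] at hih
      rw [hih]
      constructor
      · intro h s hs1 hs2
        by_cases hseq : s = t + 1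
        · subst hseq; rw [← hL]; push_cast; omega
        · exact h s (by omega) hs2
      · intro h s hs1 hs2
        exact h s (by omega) hs2

-- A's per-character test as a Bool
def amazA (l : List Char) (K : Int) (ch : Nat) : Bool :=
  let c := Char.ofNat (97 + ch)
  let last := checkFirst l c K
  (!(last = -1)) && checkScan l c K last (PySem.List.pyRange K (l.length : Int) 1)

theorem checkLoop_eq (l : List Char) (K : Int) :
    ∀ chs : List Nat, checkLoop l K chs = if chs.any (amazA l K) then 1 else 0 := by
  intro chs
  induction chs with
  | nil => simp [checkLoop]
  | cons ch rest ih =>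
    simp only [checkLoop, List.any_cons, ih, amazA]
    by_cases h1 : checkFirst l (Char.ofNat (97 + ch)) K = -1
    · simp [h1]
    · by_cases h2 : checkScan l (Char.ofNat (97 + ch)) K (checkFirst l (Char.ofNat (97 + ch)) K)
          (PySem.List.pyRange K (l.length : Int) 1) = true
      · simp [h1, h2]
      · simp [h1, h2]

theorem amazA_iff_Good (l : List Char) (K : Int) (c : Char) (hK : K ≤ (l.length : Int)) :
    ((!(checkFirst l c K = -1)) && checkScan l c K (checkFirst l c K)
        (PySem.List.pyRange K (l.length : Int) 1)) = true ↔ Good l c K := by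
  by_cases h0 : K ≤ 0
  · -- first loop runs over an empty range: last stays -1, the character is skipped; Good fails at t = 0
    have hf : checkFirst l c K = -1 := by
      rw [checkFirst, PySem.List.pyRange_one_eq_nil h0]
      rfl
    simp only [hf, decide_true, Bool.not_true, Bool.false_and, Bool.false_eq_true, false_iff]
    intro hg
    have := hg 0 (by omega)
    simp [lastIdxA] at this
    omega
  · push_neg at h0
    have hfe := checkFirst_eq l c K (by omega) hK
    rw [hfe]
    set L := lastIdxA c 0 (-1) (l.take K.toNat) with hL
    have hLb : -1 ≤ L := lastIdx_ge c _
    have hLu : L < ((l.take K.toNat).length : Int) := lastIdx_lt c _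
    have htk : ((l.take K.toNat).length : Int) = K := by simp; omega
    have hscan := checkScan_iff l c K (l.length - K.toNat) K (by omega) (by omega)
    constructor
    · intro h
      rw [Bool.and_eq_true, Bool.not_eq_true', decide_eq_false_iff_not] at h
      obtain ⟨hne, hsc⟩ := h
      rw [hscan] at hsc
      intro t ht
      by_cases h1 : t ≤ K.toNat
      · -- for t < K the gap is at most t+1 ≤ K; for t = K.toNat use L ≥ 0
        by_cases h2 : t = K.toNat
        · subst h2; rw [← hL]; omega
        · have := lastIdx_ge c (l.take t)
          omega
      · exact hsc t (by omega) ht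
    · intro hg
      rw [Bool.and_eq_true, Bool.not_eq_true', decide_eq_false_iff_not]
      have hKt := hg K.toNat (by omega)
      rw [← hL] at hKt
      constructor
      · omega
      · rw [hscan]
        intro t ht1 ht2
        exact hg t ht2

-- ===== B side =====

-- per-character view of B's single pass: (last, maxgap) for one character
def scanC (c : Char) : Int → Int → Int → List Char → Int × Int
  | _, last, mg, [] => (last, mg)
  | i, last, mg, x :: xs =>
    if x = c then scanC c (i + 1) i (if i - last > mg then i - last else mg) xs
    else scanC c (i + 1) last mg xs

theorem char_ofNat_eq_iff (x : Char) (d : Nat) (hd : d < 26) :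
    x = Char.ofNat (97 + d) ↔ (x.toNat : Int) - 97 = (d : Int) := by
  have hv : (Char.ofNat (97 + d)).toNat = 97 + d := by
    interval_cases d <;> decide
  constructor
  · intro h; rw [h, hv]; push_cast; ring
  · intro h
    have hx : x.toNat = 97 + d := by omega
    have : Char.ofNat x.toNat = Char.ofNat (97 + d) := by rw [hx]
    rwa [Char.ofNat_toNat] at this

theorem altFold (l : List Char) : ∀ (i : Int) (F G : Nat → Int) (d : Nat), d < 26 →
    (((PySem.List.enumerate l i).foldl altStep (F, G)).1 d,
     ((PySem.List.enumerate l i).foldl altStep (F, G)).2 d) =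
      scanC (Char.ofNat (97 + d)) i (F d) (G d) l := by
  induction l with
  | nil => intro i F G d hd; simp [PySem.List.enumerate_nil, scanC, List.foldl]
  | cons x xs ih =>
    intro i F G d hd
    rw [PySem.List.enumerate_cons]
    simp only [List.foldl_cons]
    by_cases hxd : x = Char.ofNat (97 + d)
    · have hx97 : (x.toNat : Int) - 97 = (d : Int) := (char_ofNat_eq_iff x d hd).mp hxd
      have hc : (0 : Int) ≤ (x.toNat : Int) - 97 ∧ (x.toNat : Int) - 97 < 26 := by omega
      have hde : ((x.toNat : Int) - 97).toNat = d := by omega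
      have h1 : (altStep (F, G) (i, x)).1 d = i := by
        simp only [altStep, if_pos hc]
        simp [hde]
      have h2 : (altStep (F, G) (i, x)).2 d = (if i - F d > G d then i - F d else G d) := by
        simp only [altStep, if_pos hc]
        simp [hde]
      have hih := ih (i + 1) (altStep (F, G) (i, x)).1 (altStep (F, G) (i, x)).2 d hd
      rw [Prod.mk.eta] at hih
      rw [hih, h1, h2]
      simp only [scanC, if_pos hxd]
    · have hFG : (altStep (F, G) (i, x)).1 d = F d ∧ (altStep (F, G) (i, x)).2 d = G d := by
        by_cases hc : (0 : Int) ≤ (x.toNat : Int) - 97 ∧ (x.toNat : Int) - 97 < 26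
        · have hde : ((x.toNat : Int) - 97).toNat ≠ d := by
            intro he
            exact hxd ((char_ofNat_eq_iff x d hd).mpr (by omega))
          constructor
          · simp only [altStep, if_pos hc]
            exact if_neg (fun h => hde h.symm)
          · simp only [altStep, if_pos hc]
            exact if_neg (fun h => hde h.symm)
        · simp only [altStep]
          rw [if_neg hc]
          exact ⟨rfl, rfl⟩
      have hih := ih (i + 1) (altStep (F, G) (i, x)).1 (altStep (F, G) (i, x)).2 d hd
      rw [Prod.mk.eta] at hih
      rw [hih, hFG.1, hFG.2]
      simp only [scanC, if_neg hxd]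

theorem scanC_append (c : Char) : ∀ (xs ys : List Char) (i last mg : Int),
    scanC c i last mg (xs ++ ys) =
      scanC c (i + xs.length) (scanC c i last mg xs).1 (scanC c i last mg xs).2 ys := by
  intro xs
  induction xs with
  | nil => intro ys i last mg; simp [scanC]
  | cons x xs ih =>
    intro ys i last mg
    simp only [List.cons_append, scanC, List.length_cons]
    by_cases hx : x = c
    · simp only [if_pos hx, ih]
      congr 1
      push_cast
      ring
    · simp only [if_neg hx, ih]
      congr 1
      push_cast
      ring

theorem scanC_fst (c : Char) : ∀ (l : List Char) (i last mg : Int),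
    (scanC c i last mg l).1 = lastIdxA c i last l := by
  intro l
  induction l with
  | nil => intro i last mg; rfl
  | cons x xs ih =>
    intro i last mg
    simp only [scanC, lastIdxA]
    by_cases hx : x = c
    · simp only [if_pos hx, ih]
    · simp only [if_neg hx, ih]

theorem if_max (a b : Int) : (if a > b then a else b) = max a b := by
  split <;> omega

theorem scanC_cond_iff (c : Char) (K : Int) (l : List Char) :
    (max ((l.length : Int) - (scanC c 0 (-1) 0 l).1) ((scanC c 0 (-1) 0 l).2) ≤ K) ↔ Good l c K := by
  induction l using List.reverseRecOn with
  | nil =>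
    simp only [scanC, Good, List.length_nil]
    constructor
    · intro h t ht
      interval_cases t
      simp [lastIdxA]
      omega
    · intro h
      have := h 0 (by omega)
      simp [lastIdxA] at this
      omega
  | append_singleton xs x ih =>
    rw [scanC_append]
    set la := (scanC c 0 (-1) 0 xs).1 with hla
    set mg := (scanC c 0 (-1) 0 xs).2 with hmg
    have hlaeq : la = lastIdxA c 0 (-1) xs := by rw [hla, scanC_fst]
    have hGood : Good (xs ++ [x]) c K ↔
        (Good xs c K ∧ ((xs.length : Int) + 1 - lastIdxA c 0 (-1) (xs ++ [x]) ≤ K)) := by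
      constructor
      · intro h
        constructor
        · intro t ht
          have := h t (by simp; omega)
          rwa [List.take_append_of_le_length ht] at this
        · have := h (xs.length + 1) (by simp)
          rwa [List.take_of_length_le (by simp)] at this
      · intro ⟨h1, h2⟩ t ht
        simp only [List.length_append, List.length_cons, List.length_nil] at ht
        by_cases hte : t ≤ xs.length
        · rw [List.take_append_of_le_length hte]
          exact h1 t hte
        · have hteq : t = xs.length + 1 := by omega
          subst hteq
          rw [List.take_of_length_le (by simp)]
          push_cast
          push_cast at h2
          omega
    by_cases hx : x = c
    · have hlast : lastIdxA c 0 (-1) (xs ++ [x]) = (xs.length : Int) := by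
        rw [lastIdxA_append]
        simp [lastIdxA, hx]
      simp only [scanC, if_pos hx, if_max, scanC, List.length_append, List.length_cons,
        List.length_nil, hGood, hlast]
      push_cast
      rw [← ih]
      constructor
      · intro h
        constructor
        · omega
        · omega
      · intro ⟨h1, h2⟩
        omega
    · have hlast : lastIdxA c 0 (-1) (xs ++ [x]) = la := by
        rw [lastIdxA_append]
        simp [lastIdxA, hx, ← hlaeq]
      simp only [scanC, if_neg hx, List.length_append, List.length_cons, List.length_nil,
        hGood, hlast, ← ih]
      have hlal : la < (xs.length : Int) := by
        rw [hlaeq]; exact lastIdx_lt c xs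
      push_cast
      constructor
      · intro h
        constructor
        · omega
        · omega
      · intro ⟨h1, h2⟩
        omega

-- B's per-character test as a Bool
def amazB (n K : Int) (last mg : Nat → Int) (c : Nat) : Bool :=
  (if n - last c > mg c then n - last c else mg c) ≤ K

theorem altFinish_eq (n K : Int) (last mg : Nat → Int) :
    ∀ cs : List Nat, altFinish n K last mg cs = if cs.any (amazB n K last mg) then 1 else 0 := by
  intro cs
  induction cs with
  | nil => simp [altFinish]
  | cons c rest ih =>
    simp only [altFinish, List.any_cons, ih, amazB]
    by_cases h : (if n - last c > mg c then n - last c else mg c) ≤ K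
    · simp [h]
    · simp [h]

-- ===== VERDICT (by name: the statement is the Claim_ definition above) =====
theorem check_spec : Claim_equal_check := by
  intro S K _ hpre
  unfold Spec_check check check_alt
  unfold Pre_check at hpre
  set l := S.toList with hl
  rw [checkLoop_eq, altFinish_eq]
  have hpoint : ∀ d : Nat, d < 26 →
      amazA l K d = amazB (l.length : Int) K
        ((PySem.List.enumerate l 0).foldl altStep (fun _ => -1, fun _ => 0)).1
        ((PySem.List.enumerate l 0).foldl altStep (fun _ => -1, fun _ => 0)).2 d := by
    intro d hd26
    have hf := altFold l 0 (fun _ => -1) (fun _ => 0) d hd26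
    have hfst : ((PySem.List.enumerate l 0).foldl altStep (fun _ => -1, fun _ => 0)).1 d =
        (scanC (Char.ofNat (97 + d)) 0 (-1) 0 l).1 := by
      have := congrArg Prod.fst hf; simpa using this
    have hsnd : ((PySem.List.enumerate l 0).foldl altStep (fun _ => -1, fun _ => 0)).2 d =
        (scanC (Char.ofNat (97 + d)) 0 (-1) 0 l).2 := by
      have := congrArg Prod.snd hf; simpa using this
    have hA := amazA_iff_Good l K (Char.ofNat (97 + d)) hpre
    have hB := scanC_cond_iff (Char.ofNat (97 + d)) K l
    simp only [amazA, amazB, hfst, hsnd]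
    rw [Bool.eq_iff_iff, hA, decide_eq_true_iff]
    simp only [if_max]
    exact hB.symm
  have hxy : (List.range 26).any (amazA l K) = (List.range 26).any
      (amazB (l.length : Int) K
        ((PySem.List.enumerate l 0).foldl altStep (fun _ => -1, fun _ => 0)).1
        ((PySem.List.enumerate l 0).foldl altStep (fun _ => -1, fun _ => 0)).2) := by
    rw [Bool.eq_iff_iff, List.any_eq_true, List.any_eq_true]
    constructor
    · rintro ⟨d, hd, hdt⟩
      exact ⟨d, hd, by rw [← hpoint d (by simpa using hd)]; exact hdt⟩
    · rintro ⟨d, hd, hdt⟩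
      exact ⟨d, hd, by rw [hpoint d (by simpa using hd)]; exact hdt⟩
  rw [hxy]
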